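-- pv_equiv track=rewrite | github.com/marloncameron/Level_0_test | task_09.py | output_vowels
-- ===== SOURCE A (Python) =====
-- def output_vowels(word):
--     vowels = "Vowels: "
--     temp_string = word.lower()
--     for i in "aeiou":
--         if(temp_string.count(i) > 0):
--             vowels += i+", "
--     vowels = vowels[:-2]
--     return vowels
-- ===== SOURCE B (Python) =====
-- def output_vowels(word):
--     found = sorted({c for c in word.lower() if c in "aeiou"})
--     vowels = "Vowels: " + "".join(v + ", " for v in found)
--     return vowels[:-2]
-- ===== Notes on version B (the rewrite author's own statement) =====
-- stated objective: idiomatic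
-- what changed: B never iterates over the vowel alphabet: it filters the lowered word's characters once into a set of vowels and sorts that set (alphabetical order of vowels coincides with a,e,i,o,u), replacing A's five per-vowel .count scans.
import Mathlib
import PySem

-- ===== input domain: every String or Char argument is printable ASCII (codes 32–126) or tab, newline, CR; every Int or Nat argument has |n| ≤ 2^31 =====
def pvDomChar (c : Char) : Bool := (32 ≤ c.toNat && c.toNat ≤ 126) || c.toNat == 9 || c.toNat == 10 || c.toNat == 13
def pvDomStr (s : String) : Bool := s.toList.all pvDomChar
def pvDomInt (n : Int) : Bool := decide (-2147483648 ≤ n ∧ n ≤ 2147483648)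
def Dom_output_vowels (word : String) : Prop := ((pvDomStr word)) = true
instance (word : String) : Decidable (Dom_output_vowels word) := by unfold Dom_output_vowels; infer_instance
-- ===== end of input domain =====

-- B replaces A's per-vowel .count scans by filtering the word's vowels into a set and sorting it (idiomatic; same return value).


-- ===== PORT A =====
-- A scans the lowered word once per vowel with .count, appending "v, " per present vowel.
def output_vowels (word : String) : String :=
  let vowels := "Vowels: ".toList
  let temp_string := PySem.Chars.lower word.toList
  let vowels := "aeiou".toList.foldl
    (fun acc i => if PySem.Chars.count temp_string [i] > 0 then acc ++ [i, ',', ' '] else acc)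
    vowels
  String.ofList (PySem.List.slice vowels none (some (-2)))

-- ===== PORT B =====
-- B: the vowels of the lowered word are collected into a set and SORTED
-- (sorted order of vowels = a,e,i,o,u); same ", " join and [:-2] trim.
def output_vowels_alt (word : String) : String :=
  let found :=
    PySem.List.sorted
      (PySem.Set.ofList ((PySem.Chars.lower word.toList).filter (fun c => "aeiou".toList.contains c)))
      (fun x => x) false
  let vowels := "Vowels: ".toList ++ found.flatMap (fun v => [v, ',', ' '])
  String.ofList (PySem.List.slice vowels none (some (-2)))

-- ===== PRECONDITION & SPEC =====
def Spec_output_vowels (word : String) (out : String) : Prop := out = output_vowels_alt word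
instance (word : String) (out : String) : Decidable (Spec_output_vowels word out) := by unfold Spec_output_vowels; infer_instance

-- ===== CLAIM (what is proved, stated in full; the proofs are below) =====
def Claim_equal_output_vowels : Prop := ∀ (word : String), Dom_output_vowels word → Spec_output_vowels word (output_vowels word)

-- ===== LEMMAS AND PROOFS =====

-- count.go with a single-character pattern counts occurrences of that character.
theorem count_go_single (v : Char) : ∀ (fuel : Nat) (l : List Char) (acc : Nat),
    PySem.Chars.count.go [v] fuel l acc = acc + (l.take fuel).count v := by
  intro fuel
  induction fuel with
  | zero => intro l acc; simp [PySem.Chars.count.go]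
  | succ n ih =>
    intro l acc
    cases l with
    | nil => simp [PySem.Chars.count.go]
    | cons h t =>
      rw [PySem.Chars.count.go]
      by_cases hv : h = v
      · subst hv
        simp [List.isPrefixOf, ih]
        omega
      · have : List.isPrefixOf [v] (h :: t) = false := by
          simp [List.isPrefixOf]; exact fun h' => (hv h'.symm).elim
        simp [this, ih, hv]

theorem count_single_pos (l : List Char) (v : Char) :
    (0 < PySem.Chars.count l [v]) ↔ v ∈ l := by
  rw [PySem.Chars.count]
  simp [count_go_single, List.count_pos_iff]

-- A's loop shape: conditional extend-by-a-chunk is filter-then-flatMap.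
theorem foldl_append_if_flatMap {α β : Type} (P : α → Prop) [DecidablePred P] (g : α → List β) :
    ∀ (l : List α) (acc : List β),
      l.foldl (fun acc x => if P x then acc ++ g x else acc) acc
        = acc ++ (l.filter (fun x => decide (P x))).flatMap g := by
  intro l
  induction l with
  | nil => simp
  | cons h t ih =>
    intro acc
    by_cases hp : P h <;> simp [hp, ih]

-- Sorting the set of vowels found names exactly "aeiou" filtered by presence.
theorem sorted_vowel_set (temp : List Char) :
    PySem.List.sorted
        (PySem.Set.ofList (temp.filter (fun c => "aeiou".toList.contains c)))
        (fun x => x) false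
      = "aeiou".toList.filter (fun v => temp.contains v) := by
  apply PySem.List.sorted_id_eq_of_perm_of_pairwise
  · rw [List.perm_ext_iff_of_nodup]
    · intro a
      simp [PySem.Set.mem_ofList, List.mem_filter, String.toList]
      tauto
    · apply List.Nodup.filter
      decide
    · exact PySem.Set.nodup_ofList _
  · have h : ("aeiou".toList.filter (fun v => temp.contains v)).Sublist "aeiou".toList :=
      List.filter_sublist
    have : ("aeiou".toList : List Char).Pairwise (· ≤ ·) := by decide
    exact this.sublist h

-- ===== VERDICT (by name: the statement is the Claim_ definition above) =====
theorem output_vowels_spec : Claim_equal_output_vowels := by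
  intro word _
  unfold Spec_output_vowels output_vowels output_vowels_alt
  generalize PySem.Chars.lower word.toList = temp
  simp only [foldl_append_if_flatMap, sorted_vowel_set]
  have : ("aeiou".toList.filter (fun i => decide (PySem.Chars.count temp [i] > 0)))
       = "aeiou".toList.filter (fun v => temp.contains v) := by
    apply List.filter_congr
    intro v _
    simp [count_single_pos]
  simp only [this]
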